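-- pv_equiv track=rewrite | github.com/remixknighx/quantitative | exercise/leetcode/matrix_cells_in_distance_order.py | allCellsDistOrder
-- ===== SOURCE A (Python) =====
-- from typing import List
-- import math
--
-- def allCellsDistOrder(R: int, C: int, r0: int, c0: int) -> List[List[int]]:
--     result_dict = dict()
--     for row in range(0, R):
--         for col in range(0, C):
--             distance = math.fabs(row - r0) + math.fabs(col - c0)
--             result_dict[str(row) + "," + str(col)] = distance
--
--     result = list()
--     for k, v in sorted(result_dict.items(), key=lambda item: item[1]):
--         result.append([int(str(k).split(',')[0]), int(str(k).split(',')[1])])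
--     return result
-- ===== SOURCE B (Python) =====
-- def allCellsDistOrder(R, C, r0, c0):
--     # Bucket (counting) sort: group cells by Manhattan distance in one row-major
--     # pass, then emit the buckets in increasing distance order.
--     buckets = {}
--     for row in range(R):
--         for col in range(C):
--             buckets.setdefault(abs(row - r0) + abs(col - c0), []).append([row, col])
--     result = []
--     for d in sorted(buckets):
--         result += buckets[d]
--     return result
-- ===== Notes on version B (the rewrite author's own statement) =====
-- stated objective: faster
-- what changed: Replaces the string-keyed dict plus comparison sort over all R*C cells (with str/int key round-trips) by a single row-major pass that groups cells into integer-distance buckets and concatenates the buckets in increasing distance order; row-major insertion preserves A's stable tie order.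
import Mathlib
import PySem

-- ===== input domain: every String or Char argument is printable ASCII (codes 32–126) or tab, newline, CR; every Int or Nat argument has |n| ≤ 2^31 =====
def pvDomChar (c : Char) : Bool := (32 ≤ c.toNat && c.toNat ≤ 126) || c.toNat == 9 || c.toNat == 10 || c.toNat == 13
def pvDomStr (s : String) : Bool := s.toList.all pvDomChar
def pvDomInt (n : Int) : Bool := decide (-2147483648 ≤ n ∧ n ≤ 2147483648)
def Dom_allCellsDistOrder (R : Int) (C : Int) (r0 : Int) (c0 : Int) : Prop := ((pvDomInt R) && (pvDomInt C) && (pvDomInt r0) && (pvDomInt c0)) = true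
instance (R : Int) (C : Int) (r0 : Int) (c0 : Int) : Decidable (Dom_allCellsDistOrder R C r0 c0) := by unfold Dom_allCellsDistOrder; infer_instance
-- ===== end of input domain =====

-- B replaces A's string-keyed dict + comparison sort over all R*C cells by one row-major
-- pass into integer-distance buckets emitted in increasing distance order (same values, same tie order).


-- ===== PORT A =====
-- Notes on exactness of this transliteration:
-- * math.fabs(row-r0)+math.fabs(col-c0) is a float holding an integer < 2^33 < 2^53, so the
--   distance values and their sort order are exact as the integer |row-r0| + |col-c0|.
-- * the Python str dict keys are modelled as their code-point lists (String.toList is a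
--   bijection, so key equality -- hence the dict -- is identical).
-- * int(s) here is only ever applied to the digit-only numerals produced by str(row)/str(col)
--   with row, col >= 0; it is ported exactly on those strings by folding the decimal digits
--   (pyIntDigits below).
-- * k.split(',')[0] / [1]: list indexing ported total as pyGetD (both indexes always in range).
def pyIntDigits (cs : List Char) : Int :=
  cs.foldl (fun a c => 10 * a + (((PySem.Int.digitVal? c).getD 0 : Nat) : Int)) 0

-- str(row) + "," + str(col)
def cellKey (row col : Int) : List Char :=
  PySem.Int.toChars row ++ ',' :: PySem.Int.toChars col

def allCellsDistOrder (R : Int) (C : Int) (r0 : Int) (c0 : Int) : List (List Int) :=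
  let resultDict : PySem.Dict (List Char) Int :=
    (PySem.List.pyRange 0 R 1).foldl (fun d row =>
      (PySem.List.pyRange 0 C 1).foldl (fun d col =>
        d.insert (cellKey row col) (|row - r0| + |col - c0|)) d) PySem.Dict.empty
  (PySem.List.sorted resultDict.items (fun item => item.2)).foldl
    (fun result kv =>
      result ++ [[pyIntDigits (PySem.List.pyGetD (PySem.Chars.splitOn kv.1 [',']) 0 []),
                  pyIntDigits (PySem.List.pyGetD (PySem.Chars.splitOn kv.1 [',']) 1 [])]]) []

-- ===== PORT B =====
-- buckets.setdefault(d, []).append([row, col]) = Dict.modify d [] (fun lst => lst ++ [[row, col]])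
def allCellsDistOrder_alt (R : Int) (C : Int) (r0 : Int) (c0 : Int) : List (List Int) :=
  let buckets : PySem.Dict Int (List (List Int)) :=
    (PySem.List.pyRange 0 R 1).foldl (fun b row =>
      (PySem.List.pyRange 0 C 1).foldl (fun b col =>
        b.modify (|row - r0| + |col - c0|) [] (fun lst => lst ++ [[row, col]])) b) PySem.Dict.empty
  (PySem.List.sorted buckets.keys (fun d => d)).foldl
    (fun result d => result ++ buckets.getD d []) []

-- ===== PRECONDITION & SPEC =====
def Spec_allCellsDistOrder (R : Int) (C : Int) (r0 : Int) (c0 : Int) (out : List (List Int)) : Prop := out = allCellsDistOrder_alt R C r0 c0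
instance (R : Int) (C : Int) (r0 : Int) (c0 : Int) (out : List (List Int)) : Decidable (Spec_allCellsDistOrder R C r0 c0 out) := by unfold Spec_allCellsDistOrder; infer_instance

-- ===== CLAIM (what is proved, stated in full; the proofs are below) =====
def Claim_equal_allCellsDistOrder : Prop := ∀ (R : Int) (C : Int) (r0 : Int) (c0 : Int), Dom_allCellsDistOrder R C r0 c0 → Spec_allCellsDistOrder R C r0 c0 (allCellsDistOrder R C r0 c0)

-- ===== LEMMAS AND PROOFS =====

theorem pv_digitVal_digitChar (d : Nat) (h : d < 10) :
    PySem.Int.digitVal? (Nat.digitChar d) = some d := by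
  interval_cases d <;> rfl

theorem pv_foldl_toDigits (m : Nat) :
    ∀ a : Int, (Nat.toDigits 10 m).foldl (fun a c => 10 * a + (((PySem.Int.digitVal? c).getD 0 : Nat) : Int)) a
      = a * 10 ^ (Nat.toDigits 10 m).length + m := by
  induction m using Nat.strong_induction_on with
  | _ m ih =>
    intro a
    by_cases hm : m < 10
    · rw [Nat.toDigits_of_lt_base hm]
      simp [pv_digitVal_digitChar m hm]
      ring
    · rw [Nat.toDigits_eq_if (by norm_num)]
      simp only [hm, if_false]
      rw [List.foldl_append, ih (m / 10) (Nat.div_lt_self (by omega) (by norm_num))]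
      have hmm : (m : Int) = 10 * ↑(m / 10) + ↑(m % 10) := by omega
      simp [pv_digitVal_digitChar (m % 10) (Nat.mod_lt _ (by norm_num))]
      simp only [pow_succ, ← mul_assoc]
      generalize a * 10 ^ (Nat.toDigits 10 (m / 10)).length = t
      omega

theorem pv_pyIntDigits_toChars (n : Int) (h : 0 ≤ n) :
    pyIntDigits (PySem.Int.toChars n) = n := by
  unfold pyIntDigits PySem.Int.toChars
  rw [if_neg (by omega)]
  rw [pv_foldl_toDigits n.toNat 0]
  simp
  omega

theorem pv_comma_not_mem_toChars (n : Int) : ',' ∉ PySem.Int.toChars n := by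
  unfold PySem.Int.toChars
  intro hmem
  split at hmem
  · rcases List.mem_cons.mp hmem with h | h
    · exact absurd h (by decide)
    · have := Nat.isDigit_of_mem_toDigits (by norm_num) (by norm_num) h
      exact absurd this (by decide)
  · have := Nat.isDigit_of_mem_toDigits (by norm_num) (by norm_num) hmem
    exact absurd this (by decide)

theorem pv_go_nocomma (v : List Char) (hv : ',' ∉ v) :
    ∀ (fuel : Nat), v.length < fuel → ∀ (cur : List Char) (acc : List (List Char)),
      PySem.Chars.splitOn.go [','] fuel v cur acc = ((cur.reverse ++ v) :: acc).reverse := by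
  induction v with
  | nil => intro fuel hf cur acc; cases fuel with
    | zero => omega
    | succ f => simp [PySem.Chars.splitOn.go]
  | cons c t ih =>
      intro fuel hf cur acc
      cases fuel with
      | zero => omega
      | succ f =>
        have hc : ¬ (',' == c) = true := by
          simp at hv ⊢; exact fun h => hv.1 h
        simp only [PySem.Chars.splitOn.go, List.isPrefixOf, Bool.and_eq_true] at *
        rw [if_neg (by simp [hc])]
        rw [ih (by simp at hv; exact hv.2) f (by simp at hf; omega) (c :: cur) acc]
        simp

theorem pv_go_comma (u : List Char) (hu : ',' ∉ u) :
    ∀ (fuel : Nat), u.length + 1 ≤ fuel → ∀ (v : List Char) (cur : List Char) (acc : List (List Char)),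
      PySem.Chars.splitOn.go [','] fuel (u ++ ',' :: v) cur acc =
        PySem.Chars.splitOn.go [','] (fuel - (u.length + 1)) v [] ((cur.reverse ++ u) :: acc) := by
  induction u with
  | nil =>
      intro fuel hf v cur acc
      cases fuel with
      | zero => omega
      | succ f => simp [PySem.Chars.splitOn.go, List.isPrefixOf]
  | cons c t ih =>
      intro fuel hf v cur acc
      cases fuel with
      | zero => omega
      | succ f =>
        have hc : ¬ (',' == c) = true := by
          simp at hu ⊢; exact fun h => hu.1 h
        simp only [List.cons_append, PySem.Chars.splitOn.go, List.isPrefixOf, Bool.and_eq_true]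
        rw [if_neg (by simp [hc])]
        rw [ih (by simp at hu; exact hu.2) f (by simp at hf ⊢; omega) v (c :: cur) acc]
        simp only [List.reverse_cons, List.append_assoc, List.singleton_append, List.length_cons]
        congr 1
        omega

theorem pv_splitOn_comma (u v : List Char) (hu : ',' ∉ u) (hv : ',' ∉ v) :
    PySem.Chars.splitOn (u ++ ',' :: v) [','] = [u, v] := by
  unfold PySem.Chars.splitOn
  rw [pv_go_comma u hu _ (by simp) v [] []]
  simp only [List.reverse_nil, List.nil_append, List.length_append, List.length_cons]
  rw [pv_go_nocomma v hv _ (by omega) [] [u]]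
  simp

theorem pv_cellKey_inj {r c r' c' : Int} (hr : 0 ≤ r) (hc : 0 ≤ c) (hr' : 0 ≤ r') (hc' : 0 ≤ c')
    (h : cellKey r c = cellKey r' c') : r = r' ∧ c = c' := by
  have h1 := pv_splitOn_comma (PySem.Int.toChars r) (PySem.Int.toChars c)
    (pv_comma_not_mem_toChars r) (pv_comma_not_mem_toChars c)
  have h2 := pv_splitOn_comma (PySem.Int.toChars r') (PySem.Int.toChars c')
    (pv_comma_not_mem_toChars r') (pv_comma_not_mem_toChars c')
  unfold cellKey at h
  rw [h] at h1
  rw [h2] at h1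
  have e1 : PySem.Int.toChars r' = PySem.Int.toChars r := by injection h1
  have e2 : PySem.Int.toChars c' = PySem.Int.toChars c := by
    injection h1 with _ h1'; injection h1'
  constructor
  · rw [← pv_pyIntDigits_toChars r hr, ← pv_pyIntDigits_toChars r' hr', e1]
  · rw [← pv_pyIntDigits_toChars c hc, ← pv_pyIntDigits_toChars c' hc', e2]

theorem pv_insertBy_map {α β : Type} (f : α → β) (bf : β → β → Bool) (x : α) (ys : List α) :
    PySem.List.insertBy bf (f x) (ys.map f) = (PySem.List.insertBy (fun a b => bf (f a) (f b)) x ys).map f := by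
  induction ys with
  | nil => rfl
  | cons y t ih => simp only [List.map, PySem.List.insertBy]; split <;> simp [ih]

theorem pv_sorted_map {α β : Type} (l : List α) (f : α → β) (key : β → Int) :
    PySem.List.sorted (l.map f) key false = (PySem.List.sorted l (fun x => key (f x)) false).map f := by
  rw [PySem.List.sorted_eq_foldl_insertBy, PySem.List.sorted_eq_foldl_insertBy, List.foldl_map]
  suffices h : ∀ acc : List α,
      l.foldl (fun acc x => PySem.List.insertBy (fun a b => decide (key a < key b)) (f x) acc) (acc.map f)
        = (l.foldl (fun acc x => PySem.List.insertBy (fun a b => decide (key (f a) < key (f b))) x acc) acc).map f by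
    simpa using h []
  induction l with
  | nil => intro acc; rfl
  | cons x t ih =>
      intro acc
      simp only [List.foldl_cons]
      rw [pv_insertBy_map f (fun a b => decide (key a < key b)) x acc]
      exact ih _

theorem pv_insertBy_append_not_before {α : Type} (before : α → α → Bool) (x : α) (pre rest : List α)
    (h : ∀ y ∈ pre, before x y = false) :
    PySem.List.insertBy before x (pre ++ rest) = pre ++ PySem.List.insertBy before x rest := by
  induction pre with
  | nil => rfl
  | cons y t ih =>
      simp only [List.cons_append, PySem.List.insertBy, h y (by simp)]
      simp only [Bool.false_eq_true, if_false, List.cons.injEq, true_and]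
      exact ih (fun z hz => h z (by simp [hz]))

theorem pv_insertBy_cons_of_forall_before {α : Type} (before : α → α → Bool) (x : α) (ys : List α)
    (h : ∀ y ∈ ys, before x y = true) :
    PySem.List.insertBy before x ys = x :: ys := by
  cases ys with
  | nil => rfl
  | cons y t => simp [PySem.List.insertBy, h y (by simp)]

theorem pv_insertBy_pairwise_lt (v : Int) :
    ∀ ks : List Int, ks.Pairwise (· < ·) → v ∉ ks →
      (PySem.List.insertBy (fun a b => decide (a < b)) v ks).Pairwise (· < ·) := by
  intro ks
  induction ks with
  | nil => intro _ _; simp [PySem.List.insertBy]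
  | cons d ks ih =>
      intro hpair hnin
      have hd : ∀ e ∈ ks, d < e := fun e he => List.rel_of_pairwise_cons hpair he
      by_cases hv : v < d
      · have : PySem.List.insertBy (fun a b => decide (a < b)) v (d :: ks) = v :: d :: ks := by
          simp [PySem.List.insertBy, hv]
        rw [this]
        refine List.Pairwise.cons ?_ hpair
        intro e he
        rcases List.mem_cons.mp he with h | h
        · omega
        · have := hd e h; omega
      · have hvd : d < v := by
          rcases lt_or_eq_of_le (not_lt.mp hv) with h | h
          · exact h
          · exact absurd h.symm (fun hh => hnin (by simp [hh]))
        have : PySem.List.insertBy (fun a b => decide (a < b)) v (d :: ks)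
            = d :: PySem.List.insertBy (fun a b => decide (a < b)) v ks := by
          simp [PySem.List.insertBy, hv]
        rw [this]
        refine List.Pairwise.cons ?_ (ih hpair.of_cons (fun h => hnin (by simp [h])))
        intro e he
        rcases (PySem.List.insertBy_mem_iff _ _ _ _).mp he with h | h
        · omega
        · exact hd e h

theorem pv_insertBy_buckets {α : Type} (key : α → Int) (x : α) (F : Int → List α) :
    ∀ ks : List Int, ks.Pairwise (· < ·) →
    (∀ d ∈ ks, F d ≠ []) →
    (∀ d ∈ ks, ∀ y ∈ F d, key y = d) →
    (key x ∉ ks → F (key x) = []) →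
    PySem.List.insertBy (fun a b => decide (key a < key b)) x (ks.flatMap F) =
      (if key x ∈ ks then ks else PySem.List.insertBy (fun a b => decide (a < b)) (key x) ks).flatMap
        (fun d => F d ++ if d = key x then [x] else []) := by
  intro ks
  induction ks with
  | nil =>
      intro _ _ _ hout
      simp [PySem.List.insertBy, hout (by simp)]
  | cons d ks ih =>
      intro hpair hne hkey hout
      have hd : ∀ e ∈ ks, d < e := fun e he => List.rel_of_pairwise_cons hpair he
      have htail : ks.Pairwise (· < ·) := hpair.of_cons
      rcases lt_trichotomy (key x) d with hlt | heq | hgt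
      · -- key x < d : new smallest bucket in front
        have hnin : key x ∉ d :: ks := by
          intro hmem
          rcases List.mem_cons.mp hmem with h | h
          · omega
          · have := hd _ h; omega
        obtain ⟨h0, t0, hFd⟩ := List.exists_cons_of_ne_nil (hne d (by simp))
        rw [if_neg hnin]
        simp only [List.flatMap_cons, hFd]
        have hstep : PySem.List.insertBy (fun a b => decide (key a < key b)) x
            ((h0 :: t0) ++ ks.flatMap F) = x :: ((h0 :: t0) ++ ks.flatMap F) := by
          simp only [List.cons_append, PySem.List.insertBy]
          rw [if_pos]
          have : key h0 = d := hkey d (by simp) h0 (by rw [hFd]; simp)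
          simp [this, hlt]
        rw [hstep]
        have hins : PySem.List.insertBy (fun a b => decide (a < b)) (key x) (d :: ks)
            = key x :: d :: ks := by
          simp [PySem.List.insertBy, hlt]
        rw [hins]
        simp only [List.flatMap_cons, hout hnin, List.nil_append]
        have hcongr : ks.flatMap (fun e => F e ++ if e = key x then [x] else []) = ks.flatMap F := by
          apply List.flatMap_congr
          intro e he
          rw [if_neg (by have := hd e he; omega), List.append_nil]
        rw [hcongr]
        simp [hFd, if_neg (by omega : ¬ d = key x)]
      · -- key x = d : append x at the end of bucket d
        rw [if_pos (by simp [heq])]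
        simp only [List.flatMap_cons]
        rw [pv_insertBy_append_not_before _ _ _ _ (by
          intro y hy
          have : key y = d := hkey d (by simp) y hy
          simp [this, heq])]
        rw [pv_insertBy_cons_of_forall_before _ _ _ (by
          intro y hy
          rcases List.mem_flatMap.mp hy with ⟨e, he, hye⟩
          have : key y = e := hkey e (by simp [he]) y hye
          have := hd e he
          simp [‹key y = e›]; omega)]
        have hcongr : ks.flatMap (fun e => F e ++ if e = key x then [x] else []) = ks.flatMap F := by
          apply List.flatMap_congr
          intro e he
          rw [if_neg (by have := hd e he; omega), List.append_nil]
        rw [hcongr, if_pos heq.symm]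
        simp
      · -- d < key x : skip bucket d and recurse
        have hne_d : key x ≠ d := by omega
        have hmem_iff : (key x ∈ d :: ks) ↔ key x ∈ ks := by simp [hne_d]
        simp only [List.flatMap_cons]
        rw [pv_insertBy_append_not_before _ _ _ _ (by
          intro y hy
          have : key y = d := hkey d (by simp) y hy
          simp [this]; omega)]
        rw [ih htail (fun e he => hne e (by simp [he])) (fun e he => hkey e (by simp [he]))
          (fun hn => hout (by simp [hne_d, hn]))]
        by_cases hmem : key x ∈ ks
        · rw [if_pos hmem, if_pos (hmem_iff.mpr hmem)]
          simp only [List.flatMap_cons, if_neg (Ne.symm hne_d), List.append_nil]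
        · rw [if_neg hmem, if_neg (fun h => hmem (hmem_iff.mp h))]
          have hins : PySem.List.insertBy (fun a b => decide (a < b)) (key x) (d :: ks)
              = d :: PySem.List.insertBy (fun a b => decide (a < b)) (key x) ks := by
            have hnl : ¬ key x < d := by omega
            simp [PySem.List.insertBy, hnl]
          rw [hins]
          simp only [List.flatMap_cons, if_neg (Ne.symm hne_d), List.append_nil]

theorem pv_sorted_eq_buckets {α : Type} (l : List α) (key : α → Int) :
    PySem.List.sorted l key false =
      (PySem.List.sorted (PySem.Set.ofList (l.map key)) (fun d => d) false).flatMap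
        (fun d => l.filter (fun y => key y == d)) := by
  induction l using List.reverseRecOn with
  | nil => rfl
  | append_singleton l x ih =>
      have hstep : PySem.List.sorted (l ++ [x]) key false
          = PySem.List.insertBy (fun a b => decide (key a < key b)) x (PySem.List.sorted l key false) := by
        rw [PySem.List.sorted_eq_foldl_insertBy, PySem.List.sorted_eq_foldl_insertBy, List.foldl_append]
        rfl
      rw [hstep, ih]
      set ks := PySem.List.sorted (PySem.Set.ofList (l.map key)) (fun d => d) false with hks
      have hpair : ks.Pairwise (· < ·) := PySem.List.sorted_ofList_pairwise_lt _
      have hmem_ks : ∀ d, d ∈ ks ↔ d ∈ l.map key := by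
        intro d
        rw [hks, PySem.List.mem_sorted, PySem.Set.mem_ofList]
      rw [pv_insertBy_buckets key x (fun d => l.filter (fun y => key y == d)) ks hpair
        (by
          intro d hd
          obtain ⟨y, hy, hyd⟩ := List.mem_map.mp ((hmem_ks d).mp hd)
          intro hnil
          have := List.filter_eq_nil_iff.mp hnil y hy
          simp [hyd] at this)
        (by
          intro d _ y hy
          have := List.of_mem_filter hy
          simpa using this)
        (by
          intro hnin
          rw [List.filter_eq_nil_iff]
          intro y hy
          simp only [beq_iff_eq]
          intro hyx
          exact hnin ((hmem_ks _).mpr (List.mem_map.mpr ⟨y, hy, hyx⟩)))]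
      have hks' : PySem.List.sorted (PySem.Set.ofList ((l ++ [x]).map key)) (fun d => d) false
          = if key x ∈ ks then ks else PySem.List.insertBy (fun a b => decide (a < b)) (key x) ks := by
        rw [List.map_append, List.map_singleton, PySem.Set.ofList_append_singleton]
        by_cases hmem : key x ∈ ks
        · rw [if_pos hmem]
          rw [PySem.Set.add_of_mem (by rw [PySem.Set.mem_ofList, ← hmem_ks]; exact hmem)]
        · rw [if_neg hmem]
          rw [PySem.Set.add_of_not_mem (by rw [PySem.Set.mem_ofList, ← hmem_ks]; exact hmem)]
          apply PySem.List.sorted_eq_of_perm_of_pairwise_lt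
          · exact ((PySem.List.insertBy_perm _ _ _).trans
              ((PySem.List.sorted_perm _ _ _).cons (key x))).trans
              (List.perm_append_singleton _ _).symm
          · exact pv_insertBy_pairwise_lt (key x) ks hpair hmem
      rw [hks']
      apply List.flatMap_congr
      intro d _
      rw [List.filter_append]
      congr 1
      by_cases hdx : d = key x
      · simp [hdx]
      · simp only [List.filter_cons, List.filter_nil]
        rw [if_neg hdx, if_neg (by simpa [beq_iff_eq] using Ne.symm hdx)]

def pvCells (R C : Int) : List (Int × Int) :=
  (PySem.List.pyRange 0 R 1).flatMap (fun r => (PySem.List.pyRange 0 C 1).map (fun c => (r, c)))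

def pvDist (r0 c0 : Int) (rc : Int × Int) : Int := |rc.1 - r0| + |rc.2 - c0|

theorem pv_nested_foldl {γ : Type} (R C : Int) (g : γ → (Int × Int) → γ) (init : γ) :
    (PySem.List.pyRange 0 R 1).foldl (fun d row =>
      (PySem.List.pyRange 0 C 1).foldl (fun d col => g d (row, col)) d) init
    = (pvCells R C).foldl g init := by
  rw [pvCells, List.foldl_flatMap]
  simp [List.foldl_map]

theorem pv_mem_cells {R C : Int} {rc : Int × Int} :
    rc ∈ pvCells R C ↔ 0 ≤ rc.1 ∧ rc.1 < R ∧ 0 ≤ rc.2 ∧ rc.2 < C := by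
  unfold pvCells
  simp only [List.mem_flatMap, List.mem_map, PySem.List.mem_pyRange_one]
  constructor
  · rintro ⟨r, ⟨hr0, hrR⟩, c, ⟨hc0, hcC⟩, rfl⟩
    exact ⟨hr0, hrR, hc0, hcC⟩
  · rintro ⟨h1, h2, h3, h4⟩
    exact ⟨rc.1, ⟨h1, h2⟩, rc.2, ⟨h3, h4⟩, rfl⟩

theorem pv_nodup_pyRange (R : Int) : (PySem.List.pyRange 0 R 1).Nodup := by
  rw [PySem.List.pyRange_of_pos 0 R (by norm_num)]
  refine List.Nodup.map ?_ (List.nodup_range)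
  intro a b h
  simpa using h

theorem pv_nodup_cells (R C : Int) : (pvCells R C).Nodup := by
  unfold pvCells
  rw [List.nodup_flatMap]
  constructor
  · intro r _
    exact List.Nodup.map (fun a b h => by simpa using h) (pv_nodup_pyRange C)
  · refine List.Pairwise.imp ?_ (pv_nodup_pyRange R)
    intro r r' hne p hp hp'
    simp only [List.mem_map] at hp hp'
    obtain ⟨c, _, rfl⟩ := hp
    obtain ⟨c', _, h⟩ := hp'
    exact hne ((Prod.mk.injEq _ _ _ _).mp h.symm |>.1)

theorem pv_A_eq (R C r0 c0 : Int) :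
    allCellsDistOrder R C r0 c0 =
      (PySem.List.sorted (pvCells R C) (pvDist r0 c0) false).map (fun rc => [rc.1, rc.2]) := by
  simp only [allCellsDistOrder]
  rw [pv_nested_foldl R C (fun d rc => d.insert (cellKey rc.1 rc.2) (|rc.1 - r0| + |rc.2 - c0|))
      PySem.Dict.empty]
  rw [PySem.Dict.items_foldl_insert_fresh (pvCells R C) (fun rc => cellKey rc.1 rc.2)
      (fun rc => |rc.1 - r0| + |rc.2 - c0|) PySem.Dict.empty
      (fun a _ => PySem.Dict.contains_empty _)
      (by
        refine List.Nodup.map_on ?_ (pv_nodup_cells R C)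
        intro p hp q hq h
        have hp' := pv_mem_cells.mp hp
        have hq' := pv_mem_cells.mp hq
        obtain ⟨h1, h2⟩ := pv_cellKey_inj hp'.1 hp'.2.2.1 hq'.1 hq'.2.2.1 h
        exact Prod.ext h1 h2)]
  rw [PySem.List.foldl_append_singleton_eq_map]
  have hempty : (PySem.Dict.empty : PySem.Dict (List Char) Int).items = [] := rfl
  simp only [hempty, List.nil_append]
  rw [pv_sorted_map (pvCells R C) (fun rc => (cellKey rc.1 rc.2, |rc.1 - r0| + |rc.2 - c0|))
      (fun item => item.2)]
  rw [List.map_map]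
  apply List.map_congr_left
  intro rc hrc
  have hmem : rc ∈ pvCells R C := by rw [PySem.List.mem_sorted] at hrc; exact hrc
  have h := pv_mem_cells.mp hmem
  simp only [Function.comp]
  rw [cellKey, pv_splitOn_comma _ _ (pv_comma_not_mem_toChars _) (pv_comma_not_mem_toChars _)]
  have g0 : PySem.List.pyGetD [PySem.Int.toChars rc.1, PySem.Int.toChars rc.2] (0 : Int) [] = PySem.Int.toChars rc.1 := rfl
  have g1 : PySem.List.pyGetD [PySem.Int.toChars rc.1, PySem.Int.toChars rc.2] (1 : Int) [] = PySem.Int.toChars rc.2 := rfl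
  rw [g0, g1, pv_pyIntDigits_toChars _ h.1, pv_pyIntDigits_toChars _ h.2.2.1]

theorem pv_B_eq (R C r0 c0 : Int) :
    allCellsDistOrder_alt R C r0 c0 =
      (PySem.List.sorted (PySem.Set.ofList ((pvCells R C).map (pvDist r0 c0))) (fun d => d) false).flatMap
        (fun d => ((pvCells R C).filter (fun y => pvDist r0 c0 y == d)).map (fun rc => [rc.1, rc.2])) := by
  simp only [allCellsDistOrder_alt]
  have h1 : (PySem.List.pyRange 0 R 1).foldl (fun b row =>
      (PySem.List.pyRange 0 C 1).foldl (fun b col =>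
        b.modify (|row - r0| + |col - c0|) [] (fun lst => lst ++ [[row, col]])) b) PySem.Dict.empty
      = (pvCells R C).foldl (fun b rc =>
          b.modify (|rc.1 - r0| + |rc.2 - c0|) [] (fun lst => lst ++ [[rc.1, rc.2]])) PySem.Dict.empty :=
    pv_nested_foldl R C (fun b rc => b.modify (|rc.1 - r0| + |rc.2 - c0|) [] (fun lst => lst ++ [[rc.1, rc.2]])) PySem.Dict.empty
  rw [h1]
  have hfold : (pvCells R C).foldl
      (fun b rc => b.modify (|rc.1 - r0| + |rc.2 - c0|) [] (fun lst => lst ++ [[rc.1, rc.2]])) PySem.Dict.empty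
      = ((pvCells R C).map (fun rc => (pvDist r0 c0 rc, [rc.1, rc.2]))).foldl
          (fun b p => b.modify p.1 [] (fun lst => lst ++ [p.2])) PySem.Dict.empty := by
    rw [List.foldl_map]
    rfl
  rw [hfold]
  have hkeys : (((pvCells R C).map (fun rc => (pvDist r0 c0 rc, [rc.1, rc.2]))).foldl
      (fun b p => b.modify p.1 [] (fun lst => lst ++ [p.2])) PySem.Dict.empty).keys
      = PySem.Set.ofList ((pvCells R C).map (pvDist r0 c0)) := by
    rw [PySem.Dict.keys_foldl_modify_key ((pvCells R C).map (fun rc => (pvDist r0 c0 rc, [rc.1, rc.2]))) (fun (p : Int × List Int) => p.1) [] (fun _ p lst => lst ++ [p.2]) PySem.Dict.empty]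
    have hke : (PySem.Dict.empty : PySem.Dict Int (List (List Int))).keys = [] := rfl
    rw [hke, PySem.Set.update_nil_left, List.map_map]
    rfl
  rw [hkeys]
  rw [PySem.List.foldl_append_eq_flatMap]
  rw [List.nil_append]
  apply List.flatMap_congr
  intro d _
  rw [PySem.Dict.getD_foldl_modify_append]
  have hge : (PySem.Dict.empty : PySem.Dict Int (List (List Int))).getD d [] = [] := rfl
  rw [hge, List.nil_append, List.filter_map]
  rw [List.map_map]
  rfl

-- ===== VERDICT (by name: the statement is the Claim_ definition above) =====
theorem allCellsDistOrder_spec : Claim_equal_allCellsDistOrder := by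
  intro R C r0 c0 _
  unfold Spec_allCellsDistOrder
  rw [pv_A_eq, pv_B_eq, pv_sorted_eq_buckets, List.map_flatMap]
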